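-- pv_equiv track=rewrite | github.com/craig-rupp/SSS_Python | 18/RMOTR/Unit3_Class1/Card2-9.py | nested_pyramid
-- ===== SOURCE A (Python) =====
-- def nested_pyramid(height, char):
--     pyr = ''
--     for i in range(1, height + 1):
--         row = ''
--         for l in range(i):
--             row += char
--         pyr += row + '\n'
--     return pyr
-- ===== SOURCE B (Python) =====
-- def nested_pyramid(height, char):
--     pyr = ''
--     current = ''
--     for _ in range(height):
--         current += char
--         pyr += current + '\n'
--     return pyr
-- ===== Notes on version B (the rewrite author's own statement) =====
-- stated objective: simpler
-- what changed: Replaces the nested loops (rebuilding each row from scratch with an inner counting loop) with a single loop that carries the previous row as an accumulator and extends it by one char per iteration.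
import Mathlib
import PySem

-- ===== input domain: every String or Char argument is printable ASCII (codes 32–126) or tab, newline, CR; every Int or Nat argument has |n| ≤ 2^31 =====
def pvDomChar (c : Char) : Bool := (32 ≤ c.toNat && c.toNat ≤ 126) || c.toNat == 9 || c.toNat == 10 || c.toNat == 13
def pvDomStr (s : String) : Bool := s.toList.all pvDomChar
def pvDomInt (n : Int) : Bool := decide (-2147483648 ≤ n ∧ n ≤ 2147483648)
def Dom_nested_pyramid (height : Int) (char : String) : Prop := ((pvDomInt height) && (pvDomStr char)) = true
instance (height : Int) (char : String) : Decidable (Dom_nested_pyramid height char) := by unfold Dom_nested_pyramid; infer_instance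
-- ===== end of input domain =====

-- B replaces A's nested loops by a single loop carrying the previous row as an accumulator (simpler: no inner loop).


-- ===== PORT A =====
-- for i in range(1, height+1): row = ''; for l in range(i): row += char; pyr += row + '\n'
def nested_pyramid (height : Int) (char : String) : String :=
  (PySem.List.pyRange 1 (height + 1) 1).foldl
    (fun pyr i =>
      pyr ++ ((PySem.List.pyRange 0 i 1).foldl (fun row _ => row ++ char) "") ++ "\n")
    ""

-- ===== PORT B =====
-- single loop: current += char; pyr += current + '\n'
def nested_pyramid_alt (height : Int) (char : String) : String :=
  ((PySem.List.pyRange 0 height 1).foldl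
    (fun (p : String × String) _ =>
      let cur := p.2 ++ char
      (p.1 ++ cur ++ "\n", cur))
    ("", "")).1

-- ===== PRECONDITION & SPEC =====
def Spec_nested_pyramid (height : Int) (char : String) (out : String) : Prop := out = nested_pyramid_alt height char
instance (height : Int) (char : String) (out : String) : Decidable (Spec_nested_pyramid height char out) := by unfold Spec_nested_pyramid; infer_instance

-- ===== CLAIM (what is proved, stated in full; the proofs are below) =====
def Claim_equal_nested_pyramid : Prop := ∀ (height : Int) (char : String), Dom_nested_pyramid height char → Spec_nested_pyramid height char (nested_pyramid height char)

-- ===== LEMMAS AND PROOFS =====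

-- char repeated n times
def pvRep (char : String) : Nat → String
  | 0 => ""
  | n + 1 => pvRep char n ++ char

theorem pvRep_succ_left (char : String) (n : Nat) : pvRep char (n + 1) = char ++ pvRep char n := by
  induction n with
  | zero => simp [pvRep]
  | succ m ih =>
    show pvRep char (m + 1) ++ char = char ++ (pvRep char m ++ char)
    rw [ih, String.append_assoc]

-- A's inner loop appends char once per element of any list
theorem innerA (char : String) : ∀ (l : List Int) (row : String),
    l.foldl (fun r _ => r ++ char) row = row ++ pvRep char l.length := by
  intro l
  induction l with
  | nil => intro row; simp [pvRep]
  | cons x xs ih =>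
    intro row
    simp only [List.foldl_cons, ih, List.length_cons]
    rw [pvRep_succ_left, ← String.append_assoc]

-- invariant of B's fold over List.range n, matched with A's row values
theorem key (char : String) : ∀ n : Nat,
    (List.range n).foldl (fun pyr k => pyr ++ pvRep char (k + 1) ++ "\n") "" =
      ((List.range n).foldl
        (fun (p : String × String) _ => (p.1 ++ (p.2 ++ char) ++ "\n", p.2 ++ char)) ("", "")).1 ∧
    ((List.range n).foldl
        (fun (p : String × String) _ => (p.1 ++ (p.2 ++ char) ++ "\n", p.2 ++ char)) ("", "")).2 =
      pvRep char n := by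
  intro n
  induction n with
  | zero => simp [pvRep]
  | succ m ih =>
    obtain ⟨h1, h2⟩ := ih
    rw [List.range_succ]
    simp only [List.foldl_append, List.foldl_cons, List.foldl_nil]
    constructor
    · rw [h1, h2]; rfl
    · rw [h2]; rfl

theorem nested_pyramid_eq_canon (height : Int) (char : String) :
    nested_pyramid height char =
      (List.range (height.toNat)).foldl (fun pyr k => pyr ++ pvRep char (k + 1) ++ "\n") "" := by
  unfold nested_pyramid
  rw [PySem.List.pyRange_one 1 (height + 1)]
  have hlen : (height + 1 - 1).toNat = height.toNat := by omega
  rw [hlen, List.foldl_map]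
  apply PySem.List.foldl_congr_mem
  intro pyr k _
  rw [innerA char, PySem.List.length_pyRange_one]
  have hk : (1 + (k : Int) - 0).toNat = k + 1 := by omega
  rw [hk]
  simp

theorem nested_pyramid_alt_eq_canon (height : Int) (char : String) :
    nested_pyramid_alt height char =
      ((List.range (height.toNat)).foldl
        (fun (p : String × String) _ => (p.1 ++ (p.2 ++ char) ++ "\n", p.2 ++ char)) ("", "")).1 := by
  unfold nested_pyramid_alt
  rw [PySem.List.pyRange_one 0 height]
  have hlen : (height - 0).toNat = height.toNat := by omega
  rw [hlen, List.foldl_map]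

-- ===== VERDICT (by name: the statement is the Claim_ definition above) =====
theorem nested_pyramid_spec : Claim_equal_nested_pyramid := by
  intro height char _
  unfold Spec_nested_pyramid
  rw [nested_pyramid_eq_canon, nested_pyramid_alt_eq_canon]
  exact (key char height.toNat).1
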